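-- pv_equiv track=rewrite | github.com/matichorvat/pydmrs | dmrs_preprocess/token_align.py | find_end
-- ===== SOURCE A (Python) =====
-- def find_end(target_end, char_spans):
--     for start in sorted(char_spans.keys()):
--         if start >= target_end:
--             break
--
--         end, _ = char_spans[start][0]
--         if target_end == end:
--             return start, end
--
--     return None
-- ===== SOURCE B (Python) =====
-- def find_end(target_end, char_spans):
--     best = None
--     for start, spans in char_spans.items():
--         if start < target_end and spans and spans[0][0] == target_end:
--             if best is None or start < best[0]:
--                 best = (start, target_end)
--     return best
-- ===== Notes on version B (the rewrite author's own statement) =====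
-- stated objective: faster
-- what changed: B replaces A's sort of the dict keys followed by an in-order scan with early break by a single unsorted pass that keeps the minimal start whose first span end equals target_end.
import Mathlib
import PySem

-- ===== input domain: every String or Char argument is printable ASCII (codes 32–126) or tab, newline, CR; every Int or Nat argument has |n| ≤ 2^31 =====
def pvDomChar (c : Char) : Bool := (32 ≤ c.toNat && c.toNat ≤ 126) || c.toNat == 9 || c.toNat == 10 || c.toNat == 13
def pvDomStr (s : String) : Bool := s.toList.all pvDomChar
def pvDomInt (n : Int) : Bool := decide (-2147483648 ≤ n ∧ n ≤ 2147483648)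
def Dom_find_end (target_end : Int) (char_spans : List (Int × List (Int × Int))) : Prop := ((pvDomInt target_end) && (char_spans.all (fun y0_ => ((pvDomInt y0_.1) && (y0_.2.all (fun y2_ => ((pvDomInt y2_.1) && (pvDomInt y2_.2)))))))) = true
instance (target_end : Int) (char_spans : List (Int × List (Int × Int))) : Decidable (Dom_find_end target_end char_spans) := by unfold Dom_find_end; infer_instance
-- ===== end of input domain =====

-- B replaces A's sort-then-scan (with early break) by one linear pass tracking the minimal
-- matching start; equivalence is about the return value (neither program mutates its arguments).

-- ===== PORT A =====
-- dict lookup char_spans[start]: first pair with that key (assoc-list convention)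
def aLookup (char_spans : List (Int × List (Int × Int))) (k : Int) : Option (Int × List (Int × Int)) :=
  char_spans.find? (fun p => p.1 == k)

-- the 'for start in sorted(...)' loop with its break / return / fall-through
def aLoop (target_end : Int) (char_spans : List (Int × List (Int × Int))) : List Int → Option (Int × Int)
  | [] => none
  | start :: rest =>
    if target_end ≤ start then none            -- break
    else
      match aLookup char_spans start with
      | none => none                           -- KeyError: unreachable (start is drawn from the keys)
      | some (_, v) =>
        match PySem.List.pyGet? v 0 with
        | none => none                         -- IndexError on char_spans[start][0]: excluded by Pre_
        | some (e, _) => if target_end = e then some (start, e) else aLoop target_end char_spans rest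

def find_end (target_end : Int) (char_spans : List (Int × List (Int × Int))) : Option (Int × Int) :=
  aLoop target_end char_spans (PySem.List.sorted (char_spans.map Prod.fst) (fun x => x) false)

-- ===== PORT B =====
-- 'start < target_end and spans and spans[0][0] == target_end'
def bMatch (target_end : Int) (p : Int × List (Int × Int)) : Bool :=
  decide (p.1 < target_end) &&
    (match p.2 with
     | [] => false
     | (e, _) :: _ => e == target_end)

def bStep (target_end : Int) (best : Option (Int × Int)) (p : Int × List (Int × Int)) : Option (Int × Int) :=
  if bMatch target_end p then
    match best with
    | none => some (p.1, target_end)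
    | some b => if p.1 < b.1 then some (p.1, target_end) else some b
  else best

def find_end_alt (target_end : Int) (char_spans : List (Int × List (Int × Int))) : Option (Int × Int) :=
  char_spans.foldl (bStep target_end) none

-- ===== PRECONDITION & SPEC =====
-- Pre_ excludes (a) association lists with duplicate keys, which no Python dict can present, and
-- (b) inputs where A raises IndexError: some key below target_end maps to an empty span list and
-- no smaller key matches, so A's scan reaches it before returning.
def Pre_find_end (target_end : Int) (char_spans : List (Int × List (Int × Int))) : Prop :=
  (char_spans.map Prod.fst).Pairwise (· ≠ ·) ∧
  ∀ p ∈ char_spans, p.1 < target_end → p.2 = [] →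
    ∃ q ∈ char_spans, q.1 < p.1 ∧ bMatch target_end q = true
instance (target_end : Int) (char_spans : List (Int × List (Int × Int))) : Decidable (Pre_find_end target_end char_spans) := by unfold Pre_find_end; infer_instance

def pvWitness_find_end : Int × (List (Int × List (Int × Int))) := (3, [(0, [(3, 7)]), (1, [])])

def Spec_find_end (target_end : Int) (char_spans : List (Int × List (Int × Int))) (out : Option (Int × Int)) : Prop := out = find_end_alt target_end char_spans
instance (target_end : Int) (char_spans : List (Int × List (Int × Int))) (out : Option (Int × Int)) : Decidable (Spec_find_end target_end char_spans out) := by unfold Spec_find_end; infer_instance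

-- ===== CLAIM (what is proved, stated in full; the proofs are below) =====
def Claim_equal_find_end : Prop := ∀ (target_end : Int) (char_spans : List (Int × List (Int × Int))), Dom_find_end target_end char_spans → Pre_find_end target_end char_spans → Spec_find_end target_end char_spans (find_end target_end char_spans)

-- ===== LEMMAS AND PROOFS =====

-- with pairwise-distinct keys, looking a member's key up returns that member
theorem lookup_self (cs : List (Int × List (Int × Int)))
    (hnd : (cs.map Prod.fst).Pairwise (· ≠ ·)) (p : Int × List (Int × Int)) (hp : p ∈ cs) :
    aLookup cs p.1 = some p := by
  induction cs with
  | nil => cases hp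
  | cons q l ih =>
    simp only [List.map_cons] at hnd
    have hpc := List.pairwise_cons.mp hnd
    rcases List.mem_cons.mp hp with rfl | hp'
    · simp [aLookup, List.find?_cons]
    · have hne : ¬ (q.1 == p.1) = true := by
        simp only [beq_iff_eq]
        exact hpc.1 p.1 (List.mem_map_of_mem hp')
      simp only [aLookup, List.find?_cons, hne, if_neg]
      simpa [aLookup] using ih (by simpa using hpc.2) hp'

-- min? is invariant under permutation
theorem min?_perm (xs ys : List Int) (h : xs.Perm ys) : xs.min? = ys.min? := by
  rcases hx : xs.min? with _ | a
  · rw [List.min?_eq_none_iff] at hx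
    subst hx
    rw [List.Perm.eq_nil h.symm]
    rfl
  · rw [List.min?_eq_some_iff] at hx
    symm
    rw [List.min?_eq_some_iff]
    exact ⟨(List.Perm.mem_iff h).mp hx.1, fun b hb => hx.2 b ((List.Perm.mem_iff h).mpr hb)⟩

-- B's fold computes the minimum matching start
theorem bFold_eq_min (t : Int) (l : List (Int × List (Int × Int))) (b : Option (Int × Int)) :
    l.foldl (bStep t) b =
      match ((l.filter (bMatch t)).map Prod.fst).min? with
      | none => b
      | some m => match b with
                  | none => some (m, t)
                  | some bb => if m < bb.1 then some (m, t) else some bb := by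
  induction l generalizing b with
  | nil => rfl
  | cons p l ih =>
    rw [List.foldl_cons, ih]
    by_cases hm : bMatch t p = true
    · simp only [List.filter_cons, hm, if_pos, List.map_cons, List.min?_cons]
      rcases hM : ((l.filter (bMatch t)).map Prod.fst).min? with _ | m <;>
        rcases b with _ | bb <;>
          simp only [Option.elim, bStep, hm, if_pos, min_def] <;>
            split_ifs <;> simp_all <;> omega
    · simp only [List.filter_cons, hm, Bool.false_eq_true, if_neg, not_false_iff]
      have hb : bStep t b p = b := by simp [bStep, hm]
      rw [hb]

theorem find_end_alt_eq_min (t : Int) (l : List (Int × List (Int × Int))) :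
    find_end_alt t l = ((l.filter (bMatch t)).map Prod.fst).min?.map (fun m => (m, t)) := by
  unfold find_end_alt
  rw [bFold_eq_min]
  rcases ((l.filter (bMatch t)).map Prod.fst).min? with _ | m <;> rfl

-- find? = head? of filter
theorem find?_eq_head?_filter {α : Type} (p : α → Bool) (l : List α) :
    l.find? p = (l.filter p).head? := by
  induction l with
  | nil => rfl
  | cons x xs ih =>
    by_cases h : p x = true
    · simp [List.find?_cons, List.filter_cons, h]
    · simp only [List.find?_cons, List.filter_cons, h]
      simpa using ih

-- min? of a ≤-sorted list is its head
theorem min?_eq_head?_of_sorted (l : List Int) (h : l.Pairwise (· ≤ ·)) :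
    l.min? = l.head? := by
  cases l with
  | nil => rfl
  | cons x xs =>
    rw [List.min?_cons']
    simp only [List.head?_cons, Option.some.injEq]
    have hx : ∀ y ∈ xs, x ≤ y := fun y hy => (List.pairwise_cons.mp h).1 y hy
    clear h
    induction xs with
    | nil => rfl
    | cons y ys ih =>
      have hxy : x ≤ y := hx y (by simp)
      rw [List.foldl_cons, min_eq_left hxy]
      exact ih (fun z hz => hx z (by simp [hz]))

-- A's loop on a sorted list of keys returns the first matching key
theorem aLoop_eq_find? (t : Int) (cs : List (Int × List (Int × Int))) (ks : List Int)
    (hs : ks.Pairwise (· ≤ ·))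
    (hlk : ∀ k ∈ ks, ∃ v, aLookup cs k = some (k, v))
    (hpre : ∀ k ∈ ks, ∀ v, aLookup cs k = some (k, v) → k < t → v = [] →
        ∃ k' ∈ ks, k' < k ∧ ∃ w, aLookup cs k' = some (k', w) ∧ bMatch t (k', w) = true) :
    aLoop t cs ks = (ks.find? (fun k => match aLookup cs k with
      | some (_, v) => bMatch t (k, v)
      | none => false)).map (fun k => (k, t)) := by
  induction ks with
  | nil => rfl
  | cons k rest ih =>
    obtain ⟨v, hv⟩ := hlk k (by simp)
    have hpc := List.pairwise_cons.mp hs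
    by_cases hbreak : t ≤ k
    · have hnone : (k :: rest).find? (fun k' => match aLookup cs k' with
          | some (_, v) => bMatch t (k', v)
          | none => false) = none := by
        rw [List.find?_eq_none]
        intro k' hk'
        have hkk' : k ≤ k' := by
          rcases List.mem_cons.mp hk' with rfl | h'
          · exact le_refl _
          · exact hpc.1 k' h'
        rcases h : aLookup cs k' with _ | q
        · simp
        · simp only [bMatch, Bool.and_eq_true, decide_eq_true_eq, not_and]
          intro hlt
          omega
      rw [hnone]
      simp [aLoop, hbreak]
    · rw [not_le] at hbreak
      simp only [aLoop, if_neg (not_le.mpr hbreak), hv]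
      cases v with
      | nil =>
        exfalso
        obtain ⟨k', hk', hlt, _⟩ := hpre k (by simp) [] hv hbreak rfl
        rcases List.mem_cons.mp hk' with rfl | h'
        · omega
        · have := hpc.1 k' h'; omega
      | cons sp vrest =>
        rcases sp with ⟨e, x⟩
        rw [PySem.List.pyGet?_zero_cons]
        dsimp only
        rw [List.find?_cons]
        rw [hv]
        dsimp only
        by_cases he : t = e
        · have hb : bMatch t (k, (e, x) :: vrest) = true := by
            simp [bMatch, hbreak, he.symm]
          rw [hb, if_pos he]
          simp [he.symm]
        · have hb : bMatch t (k, (e, x) :: vrest) = false := by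
            simp [bMatch, Ne.symm he]
          rw [hb, if_neg he]
          refine ih hpc.2 (fun k' h' => hlk k' (by simp [h'])) ?_
          intro k2 hk2 v2 hv2 hlt2 hnil2
          obtain ⟨k', hk', hlt', w, hw, hbm⟩ := hpre k2 (by simp [hk2]) v2 hv2 hlt2 hnil2
          rcases List.mem_cons.mp hk' with rfl | h'
          · exfalso
            rw [hv] at hw
            cases hw
            simp [bMatch, Ne.symm he] at hbm
          · exact ⟨k', h', hlt', w, hw, hbm⟩

-- ===== VERDICT (by name: the statement is the Claim_ definition above) =====
theorem find_end_spec : Claim_equal_find_end := by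
  intro t cs _ hpre
  obtain ⟨hnd, hpre2⟩ := hpre
  unfold Spec_find_end
  have hperm : (PySem.List.sorted (cs.map Prod.fst) (fun x => x) false).Perm (cs.map Prod.fst) :=
    PySem.List.sorted_perm _ _ _
  have hs : (PySem.List.sorted (cs.map Prod.fst) (fun x => x) false).Pairwise (· ≤ ·) := by
    simpa using PySem.List.sorted_pairwise (cs.map Prod.fst) (fun x => x)
  have hlk : ∀ k ∈ PySem.List.sorted (cs.map Prod.fst) (fun x => x) false,
      ∃ v, aLookup cs k = some (k, v) := by
    intro k hk
    obtain ⟨p, hp, rfl⟩ := List.mem_map.mp ((PySem.List.mem_sorted _ _ _ _).mp hk)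
    exact ⟨p.2, lookup_self cs hnd p hp⟩
  have hpre' : ∀ k ∈ PySem.List.sorted (cs.map Prod.fst) (fun x => x) false,
      ∀ v, aLookup cs k = some (k, v) → k < t → v = [] →
      ∃ k' ∈ PySem.List.sorted (cs.map Prod.fst) (fun x => x) false, k' < k ∧
        ∃ w, aLookup cs k' = some (k', w) ∧ bMatch t (k', w) = true := by
    intro k _ v hkv hlt hnil
    have hmem : (k, v) ∈ cs := List.mem_of_find?_eq_some hkv
    obtain ⟨q, hq, hqlt, hbm⟩ := hpre2 (k, v) hmem hlt hnil
    exact ⟨q.1, (PySem.List.mem_sorted _ _ _ _).mpr (List.mem_map_of_mem hq), hqlt,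
      q.2, lookup_self cs hnd q hq, hbm⟩
  rw [find_end, aLoop_eq_find? t cs _ hs hlk hpre', find?_eq_head?_filter,
    ← min?_eq_head?_of_sorted _ (List.Pairwise.filter _ hs)]
  have hfm : ((cs.map Prod.fst).filter (fun k => match aLookup cs k with
      | some (_, v) => bMatch t (k, v)
      | none => false)) = (cs.filter (bMatch t)).map Prod.fst := by
    rw [List.filter_map]
    congr 1
    apply List.filter_congr
    intro p hp
    simp only [Function.comp]
    rw [lookup_self cs hnd p hp]
  rw [min?_perm _ _ (hperm.filter _), hfm, find_end_alt_eq_min]
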